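-- pv_equiv track=rewrite | github.com/christmaskid/DRL-Assignment-2 | q1.py | generate_symmetries
-- ===== SOURCE A (Python) =====
-- def rot90(coords):
--   return tuple((3-y, x) for (x, y) in coords)
--
-- def rot180(coords):
--   return tuple((3-x, 3-y) for (x, y) in coords)
--
-- def rot270(coords):
--   return tuple((y, 3-x) for (x, y) in coords)
--
-- def flip(coords):
--   return tuple((x, 3-y) for (x, y) in coords)
--
-- def rot90_flip(coords):
--   return tuple((3-y, 3-x) for (x, y) in coords)
--
-- def rot180_flip(coords):
--   return tuple((3-x, y) for (x, y) in coords)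
--
-- def rot270_flip(coords):
--   return tuple((y, x) for (x, y) in coords)
--
-- def generate_symmetries(pattern):
--     # TODO: Generate 8 symmetrical transformations of the given pattern.
--     syms = [pattern]
--     for func in [
--         rot90, rot180, rot270, flip,
--         rot90_flip, rot180_flip, rot270_flip
--     ]:
--         syms.append(func(pattern))
--     return syms
-- ===== SOURCE B (Python) =====
-- def generate_symmetries(pattern):
--     def rot(c):
--         return tuple((3 - y, x) for (x, y) in c)
--     def fl(c):
--         return tuple((x, 3 - y) for (x, y) in c)
--     syms = [pattern]
--     for _ in range(3):
--         syms.append(rot(syms[-1]))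
--     for s in list(syms):
--         syms.append(fl(s))
--     return syms
-- ===== Notes on version B (the rewrite author's own statement) =====
-- stated objective: simpler
-- what changed: B replaces seven hard-coded transformation functions with two primitives (rot90 and flip), generating the four rotations by iterated composition and the four reflections by flipping a snapshot of the rotations.
import Mathlib
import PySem

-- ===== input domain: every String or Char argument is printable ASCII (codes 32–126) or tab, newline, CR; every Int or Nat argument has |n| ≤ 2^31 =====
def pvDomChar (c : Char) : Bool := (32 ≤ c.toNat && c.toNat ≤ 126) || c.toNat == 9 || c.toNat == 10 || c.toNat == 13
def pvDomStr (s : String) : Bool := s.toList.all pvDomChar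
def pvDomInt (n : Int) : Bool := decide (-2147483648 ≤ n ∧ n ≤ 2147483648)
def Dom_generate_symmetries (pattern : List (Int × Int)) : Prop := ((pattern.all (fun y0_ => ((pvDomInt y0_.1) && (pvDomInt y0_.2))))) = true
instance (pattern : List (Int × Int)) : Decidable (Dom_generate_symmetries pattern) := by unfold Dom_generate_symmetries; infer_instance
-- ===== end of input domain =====

-- B generates the four rotations by iterating one rot90 helper and the four
-- reflections by flipping a snapshot of the rotations, instead of A's seven
-- hard-coded transformation functions (objective: simpler).

-- ===== PORT A =====
def pyRot90 (coords : List (Int × Int)) : List (Int × Int) :=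
  coords.map (fun p => (3 - p.2, p.1))
def pyRot180 (coords : List (Int × Int)) : List (Int × Int) :=
  coords.map (fun p => (3 - p.1, 3 - p.2))
def pyRot270 (coords : List (Int × Int)) : List (Int × Int) :=
  coords.map (fun p => (p.2, 3 - p.1))
def pyFlip (coords : List (Int × Int)) : List (Int × Int) :=
  coords.map (fun p => (p.1, 3 - p.2))
def pyRot90Flip (coords : List (Int × Int)) : List (Int × Int) :=
  coords.map (fun p => (3 - p.2, 3 - p.1))
def pyRot180Flip (coords : List (Int × Int)) : List (Int × Int) :=
  coords.map (fun p => (3 - p.1, p.2))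
def pyRot270Flip (coords : List (Int × Int)) : List (Int × Int) :=
  coords.map (fun p => (p.2, p.1))

def generate_symmetries (pattern : List (Int × Int)) : List (List (Int × Int)) :=
  -- syms = [pattern]; for func in [...]: syms.append(func(pattern))
  ([pyRot90, pyRot180, pyRot270, pyFlip, pyRot90Flip, pyRot180Flip, pyRot270Flip]).foldl
    (fun syms func => syms ++ [func pattern]) [pattern]

-- ===== PORT B =====
def altRot (c : List (Int × Int)) : List (Int × Int) :=
  c.map (fun p => (3 - p.2, p.1))
def altFl (c : List (Int × Int)) : List (Int × Int) :=
  c.map (fun p => (p.1, 3 - p.2))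

def generate_symmetries_alt (pattern : List (Int × Int)) : List (List (Int × Int)) :=
  -- syms = [pattern]; 3 × append rot(syms[-1]); then append fl(s) for each snapshot entry
  let syms := (List.range 3).foldl (fun s _ => s ++ [altRot (s.getLastD [])]) [pattern]
  (syms).foldl (fun s t => s ++ [altFl t]) syms

-- ===== PRECONDITION & SPEC =====
def Spec_generate_symmetries (pattern : List (Int × Int)) (out : List (List (Int × Int))) : Prop := out = generate_symmetries_alt pattern
instance (pattern : List (Int × Int)) (out : List (List (Int × Int))) : Decidable (Spec_generate_symmetries pattern out) := by unfold Spec_generate_symmetries; infer_instance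

-- ===== CLAIM (what is proved, stated in full; the proofs are below) =====
def Claim_equal_generate_symmetries : Prop := ∀ (pattern : List (Int × Int)), Dom_generate_symmetries pattern → Spec_generate_symmetries pattern (generate_symmetries pattern)

-- ===== LEMMAS AND PROOFS =====

-- ===== VERDICT (by name: the statement is the Claim_ definition above) =====
theorem generate_symmetries_spec : Claim_equal_generate_symmetries := by
  intro pattern _
  unfold Spec_generate_symmetries generate_symmetries generate_symmetries_alt
  simp only [List.range_succ, List.range_zero, List.foldl_cons, List.foldl_nil,
    List.nil_append, List.cons_append, List.getLastD, List.getLast,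
    pyRot90, pyRot180, pyRot270, pyFlip, pyRot90Flip, pyRot180Flip, pyRot270Flip,
    altRot, altFl, List.map_map, List.cons.injEq, and_true, true_and]
  and_intros <;>
    (apply List.map_congr_left; intro p _; simp [Function.comp]; try omega)
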